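-- pv_equiv track=rewrite | github.com/Christdej/aoc | old_years/aoc2021/day05/day5.py | points_are_diag
-- ===== SOURCE A (Python) =====
-- def points_are_diag(p1, p2):
--     x1 = p1[0]
--     y1 = p1[1]
--     x2 = p2[0]
--     y2 = p2[1]
--
--     # if (x1 == y2 and y1 == x2) or (x1 == y1 and x2 == y2):
--     #     return True
--     if x2 > x1:
--         start_x = x1
--         end_x = x2
--     else:
--         start_x = x2
--         end_x = x1
--     if y2 > y1:
--         start_y = y1
--         end_y = y2
--     else:
--         start_y = y2
--         end_y = y1
--     for i in range(end_x - start_x):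
--         start_x += 1
--         start_y += 1
--     if start_x == end_x and start_y == end_y:
--         return True
--     return False
-- ===== SOURCE B (Python) =====
-- def points_are_diag(p1, p2):
--     return abs(p2[0] - p1[0]) == abs(p2[1] - p1[1])
-- ===== Notes on version B (the rewrite author's own statement) =====
-- stated objective: faster
-- what changed: Replaces the step-by-step walk from min(x) to max(x) (incrementing both coordinates) with the closed-form test abs(x2-x1) == abs(y2-y1).
import Mathlib
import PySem

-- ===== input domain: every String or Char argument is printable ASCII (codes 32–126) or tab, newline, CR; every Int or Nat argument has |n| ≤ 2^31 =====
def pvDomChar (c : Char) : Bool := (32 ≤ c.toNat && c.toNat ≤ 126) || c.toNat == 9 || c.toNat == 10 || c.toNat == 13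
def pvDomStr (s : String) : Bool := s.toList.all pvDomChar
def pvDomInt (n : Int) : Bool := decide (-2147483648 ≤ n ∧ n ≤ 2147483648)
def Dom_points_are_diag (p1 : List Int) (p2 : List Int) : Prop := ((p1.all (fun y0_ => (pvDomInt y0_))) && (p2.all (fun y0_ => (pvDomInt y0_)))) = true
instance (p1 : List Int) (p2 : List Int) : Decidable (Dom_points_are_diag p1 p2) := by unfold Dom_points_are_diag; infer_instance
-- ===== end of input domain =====

-- B replaces A's step-by-step coordinate walk with the closed form abs(x2-x1) == abs(y2-y1) (O(1) instead of O(|x2-x1|)).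


-- ===== PORT A =====
def points_are_diag (p1 : List Int) (p2 : List Int) : Bool :=
  match PySem.List.pyGet? p1 0, PySem.List.pyGet? p1 1,
        PySem.List.pyGet? p2 0, PySem.List.pyGet? p2 1 with
  | some x1, some y1, some x2, some y2 =>
    let sx := if x2 > x1 then x1 else x2
    let ex := if x2 > x1 then x2 else x1
    let sy := if y2 > y1 then y1 else y2
    let ey := if y2 > y1 then y2 else y1
    let st := (PySem.List.pyRange 0 (ex - sx) 1).foldl
      (fun (s : Int × Int) _ => (s.1 + 1, s.2 + 1)) (sx, sy)
    if st.1 = ex ∧ st.2 = ey then true else false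
  | _, _, _, _ => false  -- unreachable under Pre_ (IndexError in Python)

-- ===== PORT B =====
def points_are_diag_alt (p1 : List Int) (p2 : List Int) : Bool :=
  -- p1[0], p1[1], p2[0], p2[1] read by destructuring; under Pre_ both lists have ≥ 2 elements
  match p1, p2 with
  | x1 :: y1 :: _, x2 :: y2 :: _ => (x2 - x1).natAbs == (y2 - y1).natAbs
  | _, _ => false  -- unreachable under Pre_ (IndexError in Python)

-- ===== PRECONDITION & SPEC =====
-- Both A and B raise IndexError when either point has fewer than 2 coordinates.
def Pre_points_are_diag (p1 : List Int) (p2 : List Int) : Prop :=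
  2 ≤ p1.length ∧ 2 ≤ p2.length
instance (p1 : List Int) (p2 : List Int) : Decidable (Pre_points_are_diag p1 p2) := by
  unfold Pre_points_are_diag; infer_instance
def pvWitness_points_are_diag : List Int × List Int := ([1, 2], [3, 4])
def Spec_points_are_diag (p1 : List Int) (p2 : List Int) (out : Bool) : Prop := out = points_are_diag_alt p1 p2
instance (p1 : List Int) (p2 : List Int) (out : Bool) : Decidable (Spec_points_are_diag p1 p2 out) := by unfold Spec_points_are_diag; infer_instance

-- ===== CLAIM (what is proved, stated in full; the proofs are below) =====
def Claim_equal_points_are_diag : Prop := ∀ (p1 : List Int) (p2 : List Int), Dom_points_are_diag p1 p2 → Pre_points_are_diag p1 p2 → Spec_points_are_diag p1 p2 (points_are_diag p1 p2)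

-- ===== LEMMAS AND PROOFS =====
theorem foldl_inc (l : List Int) (a b : Int) :
    l.foldl (fun (s : Int × Int) _ => (s.1 + 1, s.2 + 1)) (a, b)
      = (a + l.length, b + l.length) := by
  induction l generalizing a b with
  | nil => simp
  | cons x xs ih => simp [List.foldl, ih]; constructor <;> ring

theorem points_are_diag_spec : Claim_equal_points_are_diag := by
  intro p1 p2 _ hpre
  unfold Pre_points_are_diag at hpre
  rcases p1 with _ | ⟨x1, _ | ⟨y1, r1⟩⟩ <;> rcases p2 with _ | ⟨x2, _ | ⟨y2, r2⟩⟩ <;>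
    simp only [List.length_nil, List.length_cons] at hpre <;> try omega
  unfold Spec_points_are_diag points_are_diag points_are_diag_alt
  have g0 : ∀ (a b : Int) (r : List Int), PySem.List.pyGet? (a :: b :: r) 0 = some a :=
    fun a b r => PySem.List.pyGet?_zero_cons a (b :: r)
  have g1 : ∀ (a b : Int) (r : List Int), PySem.List.pyGet? (a :: b :: r) 1 = some b := by
    intro a b r
    simp [PySem.List.pyGet?, PySem.List.pyIdx?]
  rw [g0, g1, g0, g1]
  simp only [foldl_inc, PySem.List.length_pyRange_one]
  split_ifs <;>
    (first
      | rw [eq_comm, beq_iff_eq]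
      | rw [eq_comm, beq_eq_false_iff_ne]) <;>
    omega
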